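-- pv_equiv track=rewrite | github.com/Sewef/PTU-Data | py/reorder_setup_moves.py | reorder_entry
-- ===== SOURCE A (Python) =====
-- from collections import OrderedDict
--
-- def reorder_entry(entry: OrderedDict) -> OrderedDict:
--     # If entry is not mapping, return as-is
--     if not isinstance(entry, OrderedDict):
--         return entry
--     keys_to_move = ["Set-Up Effect", "Resolution Effect"]
--     have = {k: entry[k] for k in keys_to_move if k in entry}
--     new = OrderedDict()
--     moved = set()
--
--     for k, v in entry.items():
--         if k in keys_to_move:
--             # skip here; we'll insert these before Contest Type
--             continue
--         if k == "Contest Type":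
--             # insert the moved keys (in order) before Contest Type
--             for mk in keys_to_move:
--                 if mk in have and mk not in moved:
--                     new[mk] = have[mk]
--                     moved.add(mk)
--             new[k] = v
--         else:
--             new[k] = v
--
--     # if Contest Type wasn't present, but the keys exist, append them at the end
--     for mk in keys_to_move:
--         if mk in have and mk not in moved:
--             new[mk] = have[mk]
--
--     return new
-- ===== SOURCE B (Python) =====
-- from collections import OrderedDict
--
--
-- def _split_at_key(pairs, key):
--     # split pairs at the first pair whose key is `key`: (before, from-there-on);
--     # the second part is empty when the key is absent
--     for i, kv in enumerate(pairs):
--         if kv[0] == key: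
--             return pairs[:i], pairs[i:]
--     return pairs, []
--
--
-- def reorder_entry(entry):
--     # If entry is not mapping, return as-is
--     if not isinstance(entry, OrderedDict):
--         return entry
--     keys_to_move = ["Set-Up Effect", "Resolution Effect"]
--     present = [(k, entry[k]) for k in keys_to_move if k in entry]
--     rest = [kv for kv in entry.items() if kv[0] not in keys_to_move]
--     pre, post = _split_at_key(rest, "Contest Type")
--     return OrderedDict(pre + present + post)
-- ===== Notes on version B (the rewrite author's own statement) =====
-- stated objective: simpler
-- what changed: B computes the result declaratively — collect the present movable pairs, filter them out of the entry, split the remainder at 'Contest Type' and splice the movable pairs in (appending when the key is absent, since the split's tail is then empty) — instead of A's single streaming pass that maintains a 'moved' bookkeeping set with a mid-loop insertion branch and a post-loop append.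
import Mathlib
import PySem

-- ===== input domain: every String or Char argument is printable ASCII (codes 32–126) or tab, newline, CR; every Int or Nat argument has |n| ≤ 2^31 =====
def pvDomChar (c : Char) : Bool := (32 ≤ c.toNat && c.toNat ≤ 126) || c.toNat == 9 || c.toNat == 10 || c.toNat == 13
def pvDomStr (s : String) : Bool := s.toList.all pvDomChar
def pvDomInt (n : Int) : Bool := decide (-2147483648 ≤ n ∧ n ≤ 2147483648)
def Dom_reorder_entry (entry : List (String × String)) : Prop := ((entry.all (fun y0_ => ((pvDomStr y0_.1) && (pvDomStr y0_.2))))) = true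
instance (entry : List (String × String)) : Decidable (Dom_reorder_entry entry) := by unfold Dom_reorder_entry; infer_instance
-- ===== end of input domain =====

-- B replaces A's streaming pass with its 'moved' bookkeeping set by a declarative splice:
-- filter out the movable pairs, split the remainder at "Contest Type", splice the present
-- movable pairs there (objective: simpler). Return-value equivalence on dict inputs (nodup keys).

-- ===== PORT A =====
-- the isinstance guard of the Python is vacuous under the type convention (the input IS a dict)

-- A-side helpers: the three loop bodies of A, named so the proofs can refer to them
def aHave (d : PySem.Dict String String) (h : PySem.Dict String String) (k : String) :
    PySem.Dict String String :=
  match d.get? k with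
  | some v => h.insert k v
  | none => h

def aIns (H : PySem.Dict String String) (st : PySem.Dict String String × PySem.Set String)
    (mk : String) : PySem.Dict String String × PySem.Set String :=
  match H.get? mk with
  | some v => if PySem.Set.contains st.2 mk then st else (st.1.insert mk v, PySem.Set.add st.2 mk)
  | none => st

def aStep (H : PySem.Dict String String) (st : PySem.Dict String String × PySem.Set String)
    (kv : String × String) : PySem.Dict String String × PySem.Set String :=
  if ["Set-Up Effect", "Resolution Effect"].contains kv.1 then st
  else if kv.1 = "Contest Type" then
    let st' := ["Set-Up Effect", "Resolution Effect"].foldl (aIns H) st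
    (st'.1.insert kv.1 kv.2, st'.2)
  else (st.1.insert kv.1 kv.2, st.2)

def aTail (H : PySem.Dict String String) (moved : PySem.Set String)
    (new : PySem.Dict String String) (mk : String) : PySem.Dict String String :=
  match H.get? mk with
  | some v => if PySem.Set.contains moved mk then new else new.insert mk v
  | none => new

def reorder_entry (entry : List (String × String)) : List (String × String) :=
  let d := PySem.Dict.mk entry
  let haveD := ["Set-Up Effect", "Resolution Effect"].foldl (aHave d) PySem.Dict.empty
  let st := entry.foldl (aStep haveD) (PySem.Dict.empty, PySem.Set.empty)
  (["Set-Up Effect", "Resolution Effect"].foldl (aTail haveD st.2) st.1).items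

-- ===== PORT B =====
def splitAtKey : List (String × String) → String → List (String × String) × List (String × String)
  | [], _ => ([], [])
  | kv :: rest, key =>
    if kv.1 = key then ([], kv :: rest)
    else
      let pp := splitAtKey rest key
      (kv :: pp.1, pp.2)

def reorder_entry_alt (entry : List (String × String)) : List (String × String) :=
  let d := PySem.Dict.mk entry
  let present := ["Set-Up Effect", "Resolution Effect"].filterMap
    (fun k => (d.get? k).map (fun v => (k, v)))
  let rest := entry.filter (fun kv => !(["Set-Up Effect", "Resolution Effect"].contains kv.1))
  let pp := splitAtKey rest "Contest Type"
  (PySem.Dict.ofList (pp.1 ++ present ++ pp.2)).items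

-- ===== PRECONDITION & SPEC =====
-- Pre_: the association list stands for A's OrderedDict argument, whose keys are necessarily
-- distinct; a duplicate-key list represents no input A receives.
def Pre_reorder_entry (entry : List (String × String)) : Prop := (entry.map Prod.fst).Nodup
instance (entry : List (String × String)) : Decidable (Pre_reorder_entry entry) := by
  unfold Pre_reorder_entry; infer_instance

def pvWitness_reorder_entry : (List (String × String)) :=
  [("Name", "Tackle"), ("Contest Type", "Tough"), ("Set-Up Effect", "x"), ("Range", "melee")]

def Spec_reorder_entry (entry : List (String × String)) (out : List (String × String)) : Prop := out = reorder_entry_alt entry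
instance (entry : List (String × String)) (out : List (String × String)) : Decidable (Spec_reorder_entry entry out) := by unfold Spec_reorder_entry; infer_instance

-- ===== CLAIM (what is proved, stated in full; the proofs are below) =====
def Claim_equal_reorder_entry : Prop := ∀ (entry : List (String × String)), Dom_reorder_entry entry → Pre_reorder_entry entry → Spec_reorder_entry entry (reorder_entry entry)

-- ===== LEMMAS AND PROOFS =====

lemma loop_no_ct (H : PySem.Dict String String) (l : List (String × String))
    (new : PySem.Dict String String) (moved : PySem.Set String)
    (h : "Contest Type" ∉ l.map Prod.fst) :
    l.foldl (aStep H) (new, moved) =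
      ((l.filter (fun kv => !(["Set-Up Effect","Resolution Effect"].contains kv.1))).foldl
        (fun dd kv => dd.insert kv.1 kv.2) new, moved) := by
  induction l generalizing new with
  | nil => simp
  | cons kv t ih =>
    simp only [List.map_cons, List.mem_cons, not_or] at h
    have hne : kv.1 ≠ "Contest Type" := fun e => h.1 e.symm
    by_cases h1 : kv.1 = "Set-Up Effect"
    · simp [List.foldl_cons, aStep, h1, ih _ h.2]
    · by_cases h2 : kv.1 = "Resolution Effect"
      · simp [List.foldl_cons, aStep, h2, ih _ h.2]
      · simp [List.foldl_cons, aStep, h1, h2, hne, ih _ h.2]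

lemma splitAtKey_not_mem (l : List (String × String)) (key : String)
    (h : key ∉ l.map Prod.fst) : splitAtKey l key = (l, []) := by
  induction l with
  | nil => simp [splitAtKey]
  | cons kv t ih =>
    simp only [List.map_cons, List.mem_cons] at h
    simp only [not_or] at h
    have : kv.1 ≠ key := fun e => h.1 e.symm
    simp [splitAtKey, this, ih h.2]

lemma splitAtKey_found (l1 : List (String × String)) (v : String) (l2 : List (String × String))
    (h : "Contest Type" ∉ l1.map Prod.fst) :
    splitAtKey (l1 ++ ("Contest Type", v) :: l2) "Contest Type" = (l1, ("Contest Type", v) :: l2) := by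
  induction l1 with
  | nil => simp [splitAtKey]
  | cons kv t ih =>
    simp only [List.map_cons, List.mem_cons] at h
    simp only [not_or] at h
    have : kv.1 ≠ "Contest Type" := fun e => h.1 e.symm
    simp [splitAtKey, this, ih h.2]

lemma contains_false_of_items (d : PySem.Dict String String) (L : List (String × String))
    (h : d.items = L) (k : String) (hk : k ∉ L.map Prod.fst) : d.contains k = false := by
  simp [PySem.Dict.contains_eq_decide_mem_keys, PySem.Dict.keys, h, hk]

lemma haveD_get_S (d : PySem.Dict String String) :
    ((["Set-Up Effect","Resolution Effect"] : List String).foldl (aHave d) PySem.Dict.empty).get? "Set-Up Effect" = d.get? "Set-Up Effect" := by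
  simp only [List.foldl_cons, List.foldl_nil, aHave]
  rcases hS : d.get? "Set-Up Effect" with _ | v <;> rcases hR : d.get? "Resolution Effect" with _ | w <;>
    simp [PySem.Dict.get?_insert_self, PySem.Dict.get?_insert_of_ne _ _ (by decide : ("Set-Up Effect" : String) ≠ "Resolution Effect"), PySem.Dict.get?_empty]

lemma haveD_get_R (d : PySem.Dict String String) :
    ((["Set-Up Effect","Resolution Effect"] : List String).foldl (aHave d) PySem.Dict.empty).get? "Resolution Effect" = d.get? "Resolution Effect" := by
  simp only [List.foldl_cons, List.foldl_nil, aHave]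
  rcases hS : d.get? "Set-Up Effect" with _ | v <;> rcases hR : d.get? "Resolution Effect" with _ | w <;>
    simp [PySem.Dict.get?_insert_self, PySem.Dict.get?_insert_of_ne _ _ (by decide : ("Resolution Effect" : String) ≠ "Set-Up Effect"), PySem.Dict.get?_empty]

lemma PL_haveD (d : PySem.Dict String String) :
    (["Set-Up Effect","Resolution Effect"] : List String).filterMap
        (fun k => (((["Set-Up Effect","Resolution Effect"] : List String).foldl (aHave d) PySem.Dict.empty).get? k).map (fun v => (k, v))) =
      (["Set-Up Effect","Resolution Effect"] : List String).filterMap (fun k => (d.get? k).map (fun v => (k, v))) := by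
  simp only [List.filterMap_cons, List.filterMap_nil, haveD_get_S, haveD_get_R]

lemma inner_empty (H : PySem.Dict String String) (new : PySem.Dict String String) :
    (["Set-Up Effect","Resolution Effect"] : List String).foldl (aIns H) (new, PySem.Set.empty) =
      (((["Set-Up Effect","Resolution Effect"] : List String).filterMap (fun k => (H.get? k).map (fun v => (k, v)))).foldl
          (fun dd kv => dd.insert kv.1 kv.2) new,
        ((["Set-Up Effect","Resolution Effect"] : List String).filterMap (fun k => (H.get? k).map (fun v => (k, v)))).map Prod.fst) := by
  rcases hS : H.get? "Set-Up Effect" with _ | v <;> rcases hR : H.get? "Resolution Effect" with _ | w <;>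
    simp [List.foldl_cons, aIns, hS, hR, PySem.Set.add, PySem.Set.contains, PySem.Set.empty]

lemma tail_movedP (H : PySem.Dict String String) (new : PySem.Dict String String) :
    (["Set-Up Effect","Resolution Effect"] : List String).foldl
        (aTail H (((["Set-Up Effect","Resolution Effect"] : List String).filterMap (fun k => (H.get? k).map (fun v => (k, v)))).map Prod.fst)) new = new := by
  rcases hS : H.get? "Set-Up Effect" with _ | v <;> rcases hR : H.get? "Resolution Effect" with _ | w <;>
    simp [List.foldl_cons, aTail, hS, hR, PySem.Set.contains]

lemma tail_empty (H : PySem.Dict String String) (new : PySem.Dict String String) :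
    (["Set-Up Effect","Resolution Effect"] : List String).foldl (aTail H PySem.Set.empty) new =
      ((["Set-Up Effect","Resolution Effect"] : List String).filterMap (fun k => (H.get? k).map (fun v => (k, v)))).foldl
        (fun dd kv => dd.insert kv.1 kv.2) new := by
  rcases hS : H.get? "Set-Up Effect" with _ | v <;> rcases hR : H.get? "Resolution Effect" with _ | w <;>
    simp [List.foldl_cons, aTail, hS, hR, PySem.Set.contains, PySem.Set.empty]

lemma items_insFold (l : List (String × String)) (d : PySem.Dict String String)
    (L : List (String × String)) (hd : d.items = L)
    (hnodup : (l.map Prod.fst).Nodup)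
    (hfresh : ∀ k ∈ l.map Prod.fst, k ∉ L.map Prod.fst) :
    (l.foldl (fun dd kv => dd.insert kv.1 kv.2) d).items = L ++ l := by
  have h := PySem.Dict.items_foldl_insert_fresh (l := l) (k := Prod.fst) (v := Prod.snd) (d := d)
    (fun a ha => contains_false_of_items d L hd a.1 (hfresh a.1 (List.mem_map_of_mem ha)))
    hnodup
  simpa [hd] using h

lemma items_insert_append (d : PySem.Dict String String) (L : List (String × String))
    (hd : d.items = L) (k v : String) (hk : k ∉ L.map Prod.fst) :
    (d.insert k v).items = L ++ [(k, v)] := by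
  rw [PySem.Dict.items_insert_of_not_contains (h := contains_false_of_items d L hd k hk), hd]

lemma mem_restKeys (l : List (String × String)) (k : String)
    (h : k ∈ (l.filter (fun kv => !(["Set-Up Effect","Resolution Effect"].contains kv.1))).map Prod.fst) :
    k ≠ "Set-Up Effect" ∧ k ≠ "Resolution Effect" := by
  simp only [List.mem_map, List.mem_filter, List.contains_eq_mem, List.mem_cons,
    Bool.not_eq_true', decide_eq_false_iff_not, not_or] at h
  obtain ⟨kv, ⟨-, h1, h2⟩, rfl⟩ := h
  exact ⟨h1, h2.1⟩

lemma restKeys_sublist (l : List (String × String)) :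
    ((l.filter (fun kv => !(["Set-Up Effect","Resolution Effect"].contains kv.1))).map Prod.fst).Sublist
      (l.map Prod.fst) :=
  List.filter_sublist.map Prod.fst

lemma PL_keys_sublist (H : PySem.Dict String String) :
    (((["Set-Up Effect","Resolution Effect"] : List String).filterMap (fun k => (H.get? k).map (fun v => (k, v)))).map Prod.fst).Sublist
      (["Set-Up Effect","Resolution Effect"] : List String) := by
  rcases hS : H.get? "Set-Up Effect" with _ | v <;> rcases hR : H.get? "Resolution Effect" with _ | w <;>
    simp [hS, hR]

lemma items_ofList_nodup (L : List (String × String)) (h : (L.map Prod.fst).Nodup) :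
    (PySem.Dict.ofList L).items = L := by
  have e : PySem.Dict.ofList L = L.foldl (fun dd kv => dd.insert kv.1 kv.2) PySem.Dict.empty := rfl
  rw [e]
  simpa using items_insFold L PySem.Dict.empty [] rfl h (by simp)

lemma aStep_ct (H : PySem.Dict String String) (st : PySem.Dict String String × PySem.Set String) (v : String) :
    aStep H st ("Contest Type", v) =
      (((["Set-Up Effect","Resolution Effect"] : List String).foldl (aIns H) st).1.insert "Contest Type" v,
        ((["Set-Up Effect","Resolution Effect"] : List String).foldl (aIns H) st).2) := by
  simp [aStep]

theorem present_case (e1 e2 : List (String × String)) (v : String)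
    (hpre : (((e1 ++ ("Contest Type", v) :: e2).map Prod.fst)).Nodup) :
    reorder_entry (e1 ++ ("Contest Type", v) :: e2) = reorder_entry_alt (e1 ++ ("Contest Type", v) :: e2) := by
  simp only [reorder_entry, reorder_entry_alt]
  rw [List.map_append, List.map_cons, List.nodup_append] at hpre
  obtain ⟨hn1, hn2', hdisj⟩ := hpre
  rw [List.nodup_cons] at hn2'
  obtain ⟨hcte2, hn2⟩ := hn2'
  simp only at hcte2 hdisj
  have hcte1 : "Contest Type" ∉ e1.map Prod.fst :=
    fun h => hdisj _ h _ (List.mem_cons_self ..) rfl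
  have hdisj12 : ∀ a ∈ e1.map Prod.fst, a ∉ e2.map Prod.fst :=
    fun a ha hb => hdisj a ha a (List.mem_cons_of_mem _ hb) rfl
  -- abbreviations
  set d : PySem.Dict String String := PySem.Dict.mk (e1 ++ ("Contest Type", v) :: e2) with hd
  set H : PySem.Dict String String :=
    (["Set-Up Effect","Resolution Effect"] : List String).foldl (aHave d) PySem.Dict.empty with hH
  -- A's main loop over the append
  have foldl_aStep_cons : ∀ (st : PySem.Dict String String × PySem.Set String) kv l,
      List.foldl (aStep H) st (kv :: l) = List.foldl (aStep H) (aStep H st kv) l :=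
    fun _ _ _ => List.foldl_cons ..
  rw [List.foldl_append, loop_no_ct _ _ _ _ hcte1, foldl_aStep_cons, aStep_ct, inner_empty]
  simp only
  have hctF1 : "Contest Type" ∉ (e1.filter (fun kv => !(["Set-Up Effect","Resolution Effect"].contains kv.1))).map Prod.fst :=
    fun h => hcte1 ((restKeys_sublist e1).mem h)
  have hctF2 : "Contest Type" ∉ (e2.filter (fun kv => !(["Set-Up Effect","Resolution Effect"].contains kv.1))).map Prod.fst :=
    fun h => hcte2 ((restKeys_sublist e2).mem h)
  rw [loop_no_ct _ _ _ _ hcte2, tail_movedP, PL_haveD]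
  -- nodup/freshness facts
  have hnF1 : ((e1.filter (fun kv => !(["Set-Up Effect","Resolution Effect"].contains kv.1))).map Prod.fst).Nodup :=
    (restKeys_sublist e1).nodup hn1
  have hnF2 : ((e2.filter (fun kv => !(["Set-Up Effect","Resolution Effect"].contains kv.1))).map Prod.fst).Nodup :=
    (restKeys_sublist e2).nodup hn2
  have hnP : (((["Set-Up Effect","Resolution Effect"] : List String).filterMap (fun k => (d.get? k).map (fun v => (k, v)))).map Prod.fst).Nodup :=
    (PL_keys_sublist _).nodup (by decide)
  have hPLSR : ∀ k ∈ ((["Set-Up Effect","Resolution Effect"] : List String).filterMap (fun k => (d.get? k).map (fun v => (k, v)))).map Prod.fst,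
      k = "Set-Up Effect" ∨ k = "Resolution Effect" := by
    intro k hk
    have := (PL_keys_sublist d).subset hk
    simpa using this
  have hfresh1 : ∀ k ∈ ((["Set-Up Effect","Resolution Effect"] : List String).filterMap (fun k => (d.get? k).map (fun v => (k, v)))).map Prod.fst,
      k ∉ (e1.filter (fun kv => !(["Set-Up Effect","Resolution Effect"].contains kv.1))).map Prod.fst := by
    intro k hk hmem
    have h2 := mem_restKeys e1 k hmem
    rcases hPLSR k hk with rfl | rfl
    · exact h2.1 rfl
    · exact h2.2 rfl
  have hctP : "Contest Type" ∉ (((["Set-Up Effect","Resolution Effect"] : List String).filterMap (fun k => (d.get? k).map (fun v => (k, v)))).map Prod.fst) := by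
    intro hk
    rcases hPLSR _ hk with h | h <;> simp at h
  -- items, step by step
  have h1 : ((e1.filter (fun kv => !(["Set-Up Effect","Resolution Effect"].contains kv.1))).foldl
      (fun dd kv => dd.insert kv.1 kv.2) PySem.Dict.empty).items =
      e1.filter (fun kv => !(["Set-Up Effect","Resolution Effect"].contains kv.1)) := by
    simpa using items_insFold _ PySem.Dict.empty [] rfl hnF1 (by simp)
  have h2 := items_insFold _ _ _ h1 hnP hfresh1
  have h3 := items_insert_append _ _ h2 "Contest Type" v (by
    rw [List.map_append]
    intro hmem
    rcases List.mem_append.1 hmem with h | h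
    · exact hctF1 h
    · exact hctP h)
  have h4 := items_insFold _ _ _ h3 hnF2 (by
    intro k hk hmem
    simp only [List.map_append, List.mem_append, List.map_cons] at hmem
    have hke2 : k ∈ e2.map Prod.fst := (restKeys_sublist e2).mem hk
    have hkSR := mem_restKeys e2 k hk
    rcases hmem with (h | h) | h
    · exact hdisj12 k ((restKeys_sublist e1).mem h) hke2
    · rcases hPLSR k h with rfl | rfl
      · exact hkSR.1 rfl
      · exact hkSR.2 rfl
    · simp only [List.map_nil, List.mem_singleton] at h
      exact hcte2 (h ▸ hke2))
  rw [h4]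
  -- B's side
  have hfc : List.filter (fun kv => !(["Set-Up Effect","Resolution Effect"].contains kv.1)) (("Contest Type", v) :: e2) =
      ("Contest Type", v) :: e2.filter (fun kv => !(["Set-Up Effect","Resolution Effect"].contains kv.1)) := by
    simp
  rw [List.filter_append, hfc]
  rw [splitAtKey_found _ v _ hctF1]
  rw [items_ofList_nodup]
  · simp [List.append_assoc]
  · -- nodup of the spliced key list
    simp only [List.map_append, List.map_cons, List.nodup_append, List.nodup_cons]
    refine ⟨⟨hnF1, hnP, ?_⟩, ⟨?_, hnF2⟩, ?_⟩
    · intro a ha b hb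
      rintro rfl
      exact hfresh1 a hb ha
    · exact hctF2
    · intro a ha b hb
      rintro rfl
      rcases List.mem_append.1 ha with h | h
      · rcases List.mem_cons.1 hb with rfl | h2
        · exact hctF1 h
        · exact hdisj12 a ((restKeys_sublist e1).mem h) ((restKeys_sublist e2).mem h2)
      · rcases List.mem_cons.1 hb with rfl | h2
        · exact hctP h
        · have h3 := mem_restKeys e2 a h2
          rcases hPLSR a h with rfl | rfl
          · exact h3.1 rfl
          · exact h3.2 rfl

theorem main_eq (entry : List (String × String)) (hpre : (entry.map Prod.fst).Nodup) :
    reorder_entry entry = reorder_entry_alt entry := by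
  by_cases hct : "Contest Type" ∈ entry.map Prod.fst
  · obtain ⟨⟨k0, v⟩, hp, hfst⟩ := List.mem_map.1 hct
    obtain rfl : k0 = "Contest Type" := hfst
    obtain ⟨e1, e2, rfl⟩ := List.append_of_mem hp
    exact present_case e1 e2 v hpre
  · simp only [reorder_entry, reorder_entry_alt]
    rw [loop_no_ct _ _ _ _ hct]
    simp only
    rw [tail_empty, PL_haveD]
    have hctF : "Contest Type" ∉ (entry.filter (fun kv => !(["Set-Up Effect","Resolution Effect"].contains kv.1))).map Prod.fst :=
      fun h => hct ((restKeys_sublist entry).mem h)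
    rw [splitAtKey_not_mem _ _ hctF]
    simp only [List.append_nil]
    have hnF : ((entry.filter (fun kv => !(["Set-Up Effect","Resolution Effect"].contains kv.1))).map Prod.fst).Nodup :=
      (restKeys_sublist entry).nodup hpre
    have hnP : (((["Set-Up Effect","Resolution Effect"] : List String).filterMap (fun k => ((PySem.Dict.mk entry).get? k).map (fun v => (k, v)))).map Prod.fst).Nodup :=
      (PL_keys_sublist _).nodup (by decide)
    have hfresh : ∀ k ∈ ((["Set-Up Effect","Resolution Effect"] : List String).filterMap (fun k => ((PySem.Dict.mk entry).get? k).map (fun v => (k, v)))).map Prod.fst,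
        k ∉ (entry.filter (fun kv => !(["Set-Up Effect","Resolution Effect"].contains kv.1))).map Prod.fst := by
      intro k hk hmem
      have hk2 := (PL_keys_sublist (PySem.Dict.mk entry)).subset hk
      have h2 := mem_restKeys entry k hmem
      simp only [List.mem_cons, List.not_mem_nil, or_false] at hk2
      rcases hk2 with rfl | rfl
      · exact h2.1 rfl
      · exact h2.2 rfl
    have h1 : ((entry.filter (fun kv => !(["Set-Up Effect","Resolution Effect"].contains kv.1))).foldl
        (fun dd kv => dd.insert kv.1 kv.2) PySem.Dict.empty).items =
        entry.filter (fun kv => !(["Set-Up Effect","Resolution Effect"].contains kv.1)) := by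
      simpa using items_insFold _ PySem.Dict.empty [] rfl hnF (by simp)
    rw [items_insFold _ _ _ h1 hnP hfresh, items_ofList_nodup]
    rw [List.map_append]
    exact List.Nodup.append hnF hnP (List.disjoint_right.2 hfresh)

-- ===== VERDICT (by name: the statement is the Claim_ definition above) =====
theorem reorder_entry_spec : Claim_equal_reorder_entry := by
  intro entry _ hpre
  exact main_eq entry hpre
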